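-- pv_equiv track=rewrite | github.com/tirthasg/Python-Morsels | dictionaries/Extras/grouped_char_frequency.py | get_grouped_char_frequency
-- ===== SOURCE A (Python) =====
-- def get_grouped_char_frequency(sentence: str):
--     frequency = {}
--
--     for char in sentence:
--         value = char.strip()
--
--         key = "punctuation"
--         if value.islower():
--             key = "lowercase"
--         elif value.isupper():
--             key = "uppercase"
--
--         if value:
--             frequency.setdefault(key, []).append(value)
--
--     return {key: "".join(value) for key, value in frequency.items()}
-- ===== SOURCE B (Python) =====
-- def get_grouped_char_frequency(sentence: str):
--     def category(c):
--         if c.islower():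
--             return "lowercase"
--         if c.isupper():
--             return "uppercase"
--         return "punctuation"
--
--     chars = [c for c in sentence if not c.isspace()]
--     order = list(dict.fromkeys(category(c) for c in chars))
--     return {k: "".join(c for c in chars if category(c) == k) for k in order}
-- ===== Notes on version B (the rewrite author's own statement) =====
-- stated objective: alternative
-- what changed: A makes one pass that accumulates per-category character lists in a dict via setdefault/append and then joins them; B instead filters out whitespace once, derives the key order as the deduplicated category sequence, and builds each group's string by an independent filtering scan per category.
import Mathlib
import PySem

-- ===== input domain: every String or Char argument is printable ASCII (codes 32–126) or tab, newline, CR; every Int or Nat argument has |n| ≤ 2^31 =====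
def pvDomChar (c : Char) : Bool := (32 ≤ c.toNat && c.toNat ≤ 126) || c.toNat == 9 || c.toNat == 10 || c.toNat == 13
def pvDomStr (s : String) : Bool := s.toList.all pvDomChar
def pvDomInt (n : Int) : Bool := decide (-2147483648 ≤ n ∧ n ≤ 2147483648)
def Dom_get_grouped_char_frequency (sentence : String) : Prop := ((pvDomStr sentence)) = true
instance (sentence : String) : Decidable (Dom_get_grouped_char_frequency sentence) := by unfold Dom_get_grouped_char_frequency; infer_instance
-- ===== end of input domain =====

-- B replaces A's single categorizing dict-accumulation pass by independent per-category
-- filtering scans over the non-whitespace characters (alternative decomposition, same cost).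


-- ===== PORT A =====
-- hand port of Python str.islower / str.isupper (exact on ASCII strings, the only
-- arguments that arise here: char.strip() of a single character):
-- islower = has a lowercase letter and no uppercase letter, isupper symmetrically.
def pvStrIslower (cs : List Char) : Bool :=
  cs.any PySem.Chars.islower && cs.all (fun c => !PySem.Chars.isupper c)
def pvStrIsupper (cs : List Char) : Bool :=
  cs.any PySem.Chars.isupper && cs.all (fun c => !PySem.Chars.islower c)

def get_grouped_char_frequency (sentence : String) : List (String × String) :=
  let frequency : PySem.Dict String (List (List Char)) :=
    sentence.toList.foldl (fun frequency char =>
      let value := PySem.Chars.strip [char]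
      let key := if pvStrIslower value then "lowercase"
                 else if pvStrIsupper value then "uppercase"
                 else "punctuation"
      if value ≠ [] then frequency.modify key [] (· ++ [value]) else frequency)
      PySem.Dict.empty
  frequency.items.map (fun kv => (kv.1, String.ofList (PySem.Chars.join [] kv.2)))

-- ===== PORT B =====
def pvCategory (c : Char) : String :=
  if PySem.Chars.islower c then "lowercase"
  else if PySem.Chars.isupper c then "uppercase"
  else "punctuation"

def get_grouped_char_frequency_alt (sentence : String) : List (String × String) :=
  let chars := sentence.toList.filter (fun c => !PySem.Chars.isspace c)
  let order := PySem.List.dedup (chars.map pvCategory)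
  order.map (fun k => (k, String.ofList (chars.filter (fun c => pvCategory c == k))))

-- ===== PRECONDITION & SPEC =====
def Spec_get_grouped_char_frequency (sentence : String) (out : List (String × String)) : Prop := out = get_grouped_char_frequency_alt sentence
instance (sentence : String) (out : List (String × String)) : Decidable (Spec_get_grouped_char_frequency sentence out) := by unfold Spec_get_grouped_char_frequency; infer_instance

-- ===== CLAIM (what is proved, stated in full; the proofs are below) =====
def Claim_equal_get_grouped_char_frequency : Prop := ∀ (sentence : String), Dom_get_grouped_char_frequency sentence → Spec_get_grouped_char_frequency sentence (get_grouped_char_frequency sentence)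

-- ===== LEMMAS AND PROOFS =====

theorem strip_singleton (c : Char) :
    PySem.Chars.strip [c] = if PySem.Chars.isspace c then [] else [c] := by
  simp only [PySem.Chars.strip, PySem.Chars.lstrip, PySem.Chars.rstrip]
  by_cases h : PySem.Chars.isspace c <;> simp [h, List.dropWhile]

theorem islower_not_isupper (c : Char) (h : PySem.Chars.islower c = true) :
    PySem.Chars.isupper c = false := by
  simp only [PySem.Chars.islower, Bool.and_eq_true, decide_eq_true_eq] at h
  have h2 : ¬ c ≤ 'Z' := not_le.mpr (lt_of_lt_of_le (by decide : ('Z' : Char) < 'a') h.1)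
  simp [PySem.Chars.isupper, h2]

theorem pvStrIslower_singleton (c : Char) : pvStrIslower [c] = PySem.Chars.islower c := by
  by_cases h : PySem.Chars.islower c = true
  · simp [pvStrIslower, h, islower_not_isupper c h]
  · rw [Bool.not_eq_true] at h
    simp [pvStrIslower, h]

theorem pvStrIsupper_singleton (c : Char) (hl : PySem.Chars.islower c = false) :
    pvStrIsupper [c] = PySem.Chars.isupper c := by
  simp [pvStrIsupper, hl]

-- A's per-character step, rewritten through the category function.
theorem stepA_char (d : PySem.Dict String (List (List Char))) (c : Char) :
    (let value := PySem.Chars.strip [c]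
     let key := if pvStrIslower value then "lowercase"
                else if pvStrIsupper value then "uppercase"
                else "punctuation"
     if value ≠ [] then d.modify key [] (· ++ [value]) else d)
    = if PySem.Chars.isspace c then d else d.modify (pvCategory c) [] (· ++ [[c]]) := by
  by_cases hs : PySem.Chars.isspace c
  · simp [strip_singleton, hs]
  · by_cases hl : PySem.Chars.islower c = true
    · simp [strip_singleton, hs, pvStrIslower_singleton, hl, pvCategory]
    · rw [Bool.not_eq_true] at hl
      simp [strip_singleton, hs, pvStrIslower_singleton, hl,
        pvStrIsupper_singleton c hl, pvCategory]


theorem foldA_eq (l : List Char) (d : PySem.Dict String (List (List Char))) :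
    l.foldl (fun frequency char =>
      let value := PySem.Chars.strip [char]
      let key := if pvStrIslower value then "lowercase"
                 else if pvStrIsupper value then "uppercase"
                 else "punctuation"
      if value ≠ [] then frequency.modify key [] (· ++ [value]) else frequency) d
    = (l.filter (fun c => !PySem.Chars.isspace c)).foldl
        (fun d c => PySem.Dict.modify d (pvCategory c) [] (· ++ [[c]])) d := by
  induction l generalizing d with
  | nil => rfl
  | cons c l ih =>
    rw [List.foldl_cons, List.filter_cons, stepA_char]
    by_cases hs : PySem.Chars.isspace c = true
    · rw [if_pos hs, if_neg (by simp [hs])]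
      exact ih d
    · rw [Bool.not_eq_true] at hs
      rw [if_neg (by simp [hs]), if_pos (by simp [hs]), List.foldl_cons]
      exact ih _

theorem find?_beq_of_mem {k : String} {O : List String} (h : k ∈ O) :
    O.find? (fun k' => k' == k) = some k := by
  induction O with
  | nil => cases h
  | cons a O ih =>
    by_cases ha : a = k
    · simp [List.find?, ha]
    · have hb : (a == k) = false := beq_eq_false_iff_ne.mpr ha
      have : k ∈ O := by cases h with | head => exact absurd rfl ha | tail _ h => exact h
      simp [List.find?, hb, ih this]

theorem modify_items (d : PySem.Dict String (List (List Char))) (O : List String)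
    (F : String → List (List Char)) (hd : d.items = O.map fun k' => (k', F k'))
    (k : String) (x : List Char) :
    (PySem.Dict.modify d k [] (· ++ [x])).items =
      if k ∈ O then O.map (fun k' => (k', if k' = k then F k ++ [x] else F k'))
      else (O.map fun k' => (k', F k')) ++ [(k, [x])] := by
  have hcont : d.contains k = decide (k ∈ O) := by
    simp only [PySem.Dict.contains, hd, List.any_map, Function.comp_def]
    rw [List.any_beq']
    exact List.contains_eq_mem k O
  by_cases hmem : k ∈ O
  · have hget : d.get? k = some (F k) := by
      simp only [PySem.Dict.get?, hd, List.find?_map, Function.comp_def]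
      have : (fun k' => ((k', F k').1 == k)) = (fun k' => k' == k) := rfl
      rw [this, find?_beq_of_mem hmem]
      rfl
    simp only [PySem.Dict.modify, PySem.Dict.insert, hcont, hmem, decide_true, if_true,
      PySem.Dict.getD, hget, Option.getD_some, hd, List.map_map]
    apply List.map_congr_left
    intro k' hk'
    by_cases hkk : k' = k
    · subst hkk; simp
    · simp [Function.comp, hkk, beq_eq_false_iff_ne.mpr hkk]
  · have hget : d.get? k = none := by
      simp only [PySem.Dict.get?, hd, List.find?_map]
      rw [List.find?_eq_none.mpr]
      · rfl
      · intro k' hk'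
        simp only [Function.comp_def, beq_iff_eq]
        exact fun (h : k' = k) => hmem (h ▸ hk')
    simp [PySem.Dict.modify, PySem.Dict.insert, hcont, hmem, PySem.Dict.getD, hget, hd]

theorem group_items (l : List Char) :
    (l.foldl (fun d c => PySem.Dict.modify d (pvCategory c) [] (· ++ [[c]])) PySem.Dict.empty).items
    = (PySem.List.dedup (l.map pvCategory)).map
        (fun k => (k, (l.filter (fun c => pvCategory c == k)).map (fun c => ([c] : List Char)))) := by
  induction l using List.reverseRecOn with
  | nil => rfl
  | append_singleton l c ih =>
    rw [List.foldl_append, List.foldl_cons, List.foldl_nil]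
    have hded : PySem.List.dedup ((l ++ [c]).map pvCategory)
        = PySem.Set.add (PySem.List.dedup (l.map pvCategory)) (pvCategory c) := by
      simp [PySem.List.dedup, PySem.Set.ofList_eq_foldl, List.foldl_append]
    rw [modify_items _ (PySem.List.dedup (l.map pvCategory)) _ ih, hded]
    by_cases hmem : pvCategory c ∈ PySem.List.dedup (l.map pvCategory)
    · have hadd : PySem.Set.add (PySem.List.dedup (l.map pvCategory)) (pvCategory c)
          = PySem.List.dedup (l.map pvCategory) := by
        simp [PySem.Set.add, PySem.Set.contains]
        exact List.mem_map.mp ((PySem.List.mem_dedup _ _).mp hmem)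
      rw [hadd, if_pos hmem]
      apply List.map_congr_left
      intro k' hk'
      by_cases hkk : k' = pvCategory c
      · subst hkk
        simp [List.filter_append, List.filter]
      · simp [List.filter_append, List.filter, hkk, beq_eq_false_iff_ne.mpr (Ne.symm hkk)]
    · have hadd : PySem.Set.add (PySem.List.dedup (l.map pvCategory)) (pvCategory c)
          = PySem.List.dedup (l.map pvCategory) ++ [pvCategory c] := by
        simp [PySem.Set.add, PySem.Set.contains]
        intro x hx h
        exact hmem ((PySem.List.mem_dedup _ _).mpr (List.mem_map.mpr ⟨x, hx, h⟩))
      have hfilter : l.filter (fun c' => pvCategory c' == pvCategory c) = [] := by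
        rw [List.filter_eq_nil_iff]
        intro a ha h
        rw [beq_iff_eq] at h
        exact hmem ((PySem.List.mem_dedup _ _).mpr (List.mem_map.mpr ⟨a, ha, h⟩))
      rw [if_neg hmem, hadd, List.map_append]
      congr 1
      · apply List.map_congr_left
        intro k' hk'
        have hkk : pvCategory c ≠ k' := fun h => hmem (h ▸ hk')
        simp [List.filter_append, List.filter, beq_eq_false_iff_ne.mpr hkk]
      · simp [List.filter_append, List.filter, hfilter]
-- ===== VERDICT (by name: the statement is the Claim_ definition above) =====
theorem get_grouped_char_frequency_spec : Claim_equal_get_grouped_char_frequency := by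
  intro sentence _
  unfold Spec_get_grouped_char_frequency get_grouped_char_frequency get_grouped_char_frequency_alt
  rw [foldA_eq]
  dsimp only
  rw [group_items, List.map_map]
  apply List.map_congr_left
  intro k hk
  simp [Function.comp, PySem.Chars.join_nil_singletons]
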